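-- pv_equiv track=rewrite | github.com/FoundationAgents/OpenManus | app/agent/specialists/reverse_engineering.py | _extract_protocol_spec
-- ===== SOURCE A (Python) =====
-- def _extract_protocol_spec(text: str) -> str:
--     """Extract protocol specification"""
--     lines = text.split('\n')
--     spec_lines = []
--     in_spec = False
--
--     for line in lines:
--         if any(keyword in line.lower() for keyword in ['specification', 'format', 'structure', 'message']):
--             in_spec = True
--         if in_spec and line.strip():
--             spec_lines.append(line)
--             if len(spec_lines) > 30:
--                 break
--
--     return '\n'.join(spec_lines)
-- ===== SOURCE B (Python) =====
-- def _extract_protocol_spec(text: str) -> str: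
--     """Extract protocol specification (flat-text keyword search, then line cut)"""
--     low = text.lower()
--     hits = [p for p in (low.find(k) for k in ('specification', 'format', 'structure', 'message')) if p >= 0]
--     if not hits:
--         return ''
--     i = text[:min(hits)].count('\n')
--     return '\n'.join([l for l in text.split('\n')[i:] if l.strip()][:31])
-- ===== Notes on version B (the rewrite author's own statement) =====
-- stated objective: alternative
-- what changed: Replaced A's per-line flag loop (lowercase each line, test four keywords, toggle in_spec, append with a length break) by a flat-text computation: lower the whole text once, find each keyword's first occurrence in the flat string, convert the minimum hit position to a line index by counting newlines before it, then filter-and-slice the tail lines.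
import Mathlib
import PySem

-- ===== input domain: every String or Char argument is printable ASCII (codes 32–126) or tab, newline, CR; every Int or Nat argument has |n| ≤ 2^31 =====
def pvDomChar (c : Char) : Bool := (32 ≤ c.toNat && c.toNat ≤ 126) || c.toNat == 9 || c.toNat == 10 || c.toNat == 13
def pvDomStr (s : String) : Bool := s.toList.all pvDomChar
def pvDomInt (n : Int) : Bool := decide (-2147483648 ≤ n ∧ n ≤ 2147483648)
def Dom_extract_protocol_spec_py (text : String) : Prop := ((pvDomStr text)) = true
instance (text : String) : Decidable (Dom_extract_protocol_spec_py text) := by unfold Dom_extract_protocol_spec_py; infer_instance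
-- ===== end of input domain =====

-- B replaces A's per-line flag loop by a flat-text search: it searches the lowered whole text for
-- each keyword, converts the earliest hit position to a line number by counting newlines before it,
-- and only then cuts the line list (objective: alternative).


-- ===== PORT A =====
-- 'any(keyword in line.lower() for keyword in [...])'
def pvKw (line : String) : Bool :=
  ["specification", "format", "structure", "message"].any
    (fun k => PySem.Str.isIn k (PySem.Str.lower line))

-- the for-loop of A: state = (spec_lines, in_spec); 'break' = returning the accumulator
def pvLoopA : List String → List String → Bool → List String
  | [], specLines, _ => specLines
  | line :: rest, specLines, inSpec =>
    let inSpec' := if pvKw line then true else inSpec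
    if inSpec' && (PySem.Str.strip line != "") then
      let specLines' := specLines ++ [line]
      if specLines'.length > 30 then specLines'
      else pvLoopA rest specLines' inSpec'
    else pvLoopA rest specLines inSpec'

-- sep "\n" is nonempty, so PySem.Str.split? always returns some; .getD [] only totalises the Option
def extract_protocol_spec_py (text : String) : String :=
  let lines := (PySem.Str.split? text "\n").getD []
  PySem.Str.join "\n" (pvLoopA lines [] false)

-- ===== PORT B =====
-- B: low = text.lower(); hits = [p for p in (low.find(k) for k in KWS) if p >= 0];
-- if not hits: ''; else i = text[:min(hits)].count('\n'); join(filter-nonempty(lines[i:])[:31])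
def extract_protocol_spec_py_alt (text : String) : String :=
  let low := PySem.Str.lower text
  let hits := (["specification", "format", "structure", "message"].map
      (fun k => PySem.Str.find low k)).filter (fun p => decide (0 ≤ p))
  match PySem.List.min? hits (fun p => p) with
  | none => ""
  | some m =>
    let i : Nat := PySem.Str.count (PySem.Str.slice text none (some m)) "\n"
    let lines := (PySem.Str.split? text "\n").getD []
    PySem.Str.join "\n"
      (PySem.List.slice
        ((PySem.List.slice lines (some (i : Int)) none).filter
          (fun l => PySem.Str.strip l != ""))
        none (some 31))

-- ===== PRECONDITION & SPEC =====
def Spec_extract_protocol_spec_py (text : String) (out : String) : Prop := out = extract_protocol_spec_py_alt text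
instance (text : String) (out : String) : Decidable (Spec_extract_protocol_spec_py text out) := by unfold Spec_extract_protocol_spec_py; infer_instance

-- ===== CLAIM (what is proved, stated in full; the proofs are below) =====
def Claim_equal_extract_protocol_spec_py : Prop := ∀ (text : String), Dom_extract_protocol_spec_py text → Spec_extract_protocol_spec_py text (extract_protocol_spec_py text)

-- ===== LEMMAS AND PROOFS =====

-- ---------- A-side characterisation ----------

-- Once in_spec is true, A collects the nonempty lines, at most 31 of them.
theorem pvLoopA_true (ls : List String) :
    ∀ acc : List String, acc.length ≤ 30 →
      pvLoopA ls acc true =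
        acc ++ (ls.filter (fun l => PySem.Str.strip l != "")).take (31 - acc.length) := by
  induction ls with
  | nil => intro acc _; simp [pvLoopA]
  | cons l ls ih =>
    intro acc hacc
    simp only [pvLoopA, ite_self, Bool.true_and]
    by_cases hs : PySem.Str.strip l != ""
    · rw [if_pos hs, List.filter_cons, if_pos hs]
      by_cases hlen : (acc ++ [l]).length > 30
      · have h30 : acc.length = 30 := by simp at hlen; omega
        rw [if_pos hlen]
        simp [h30]
      · rw [if_neg hlen, ih (acc ++ [l]) (by omega)]
        have h31 : 31 - acc.length = (31 - (acc ++ [l]).length) + 1 := by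
          simp; omega
        rw [h31, List.take_succ_cons, List.append_assoc, List.singleton_append]
    · rw [if_neg hs, List.filter_cons, if_neg hs, ih acc hacc]

-- When the head matches a keyword, starting with in_spec false is the same as true.
theorem pvLoopA_false_eq_true (l : String) (ls acc : List String) (h : pvKw l = true) :
    pvLoopA (l :: ls) acc false = pvLoopA (l :: ls) acc true := by
  simp [pvLoopA, h]

-- A's loop from in_spec = false, characterised via the index of the first keyword line.
theorem pvLoopA_false (ls : List String) :
    pvLoopA ls [] false =
      match ls.findIdx? pvKw with
      | none => []
      | some i => ((ls.drop i).filter (fun l => PySem.Str.strip l != "")).take 31 := by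
  induction ls with
  | nil => simp [pvLoopA]
  | cons l ls ih =>
    by_cases h : pvKw l = true
    · rw [pvLoopA_false_eq_true l ls [] h, pvLoopA_true (l :: ls) [] (by simp)]
      simp [List.findIdx?_cons, h]
    · have hb : pvKw l = false := by simp_all
      simp only [pvLoopA, hb, Bool.false_eq_true, if_false, Bool.false_and, ih]
      rw [List.findIdx?_cons, hb]
      simp only [Bool.false_eq_true, if_false]
      cases ls.findIdx? pvKw <;> simp

-- ---------- splitting by '\n': a simple structural recursion and the bridge to PySem ----------

def pvSplitNL : List Char → List (List Char)
  | [] => [[]]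
  | c :: t =>
    if c = '\n' then [] :: pvSplitNL t
    else
      match pvSplitNL t with
      | [] => [[c]]
      | g :: gs => (c :: g) :: gs

def pvConsHead (pre : List Char) : List (List Char) → List (List Char)
  | [] => [pre]
  | g :: gs => (pre ++ g) :: gs

theorem pvSplitNL_ne_nil (cs : List Char) : pvSplitNL cs ≠ [] := by
  induction cs with
  | nil => simp [pvSplitNL]
  | cons c t ih =>
    simp only [pvSplitNL]
    split
    · simp
    · cases h : pvSplitNL t <;> simp

theorem pvGo_split (fuel : Nat) : ∀ (l cur : List Char) (acc : List (List Char)),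
    l.length < fuel →
    PySem.Chars.splitOn.go ['\n'] fuel l cur acc = acc.reverse ++ pvConsHead cur.reverse (pvSplitNL l) := by
  induction fuel with
  | zero => intro l cur acc h; omega
  | succ f ih =>
    intro l cur acc h
    cases l with
    | nil => simp [PySem.Chars.splitOn.go, pvSplitNL, pvConsHead]
    | cons c rest =>
      by_cases hc : c = '\n'
      · subst hc
        have hgo : PySem.Chars.splitOn.go ['\n'] (f+1) ('\n' :: rest) cur acc
            = PySem.Chars.splitOn.go ['\n'] f rest [] (cur.reverse :: acc) := by
          simp [PySem.Chars.splitOn.go, List.isPrefixOf]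
        rw [hgo, ih rest [] (cur.reverse :: acc) (by simp at h ⊢; omega)]
        simp only [pvSplitNL]
        cases hS : pvSplitNL rest with
        | nil => exact absurd hS (pvSplitNL_ne_nil rest)
        | cons g gs => simp [pvConsHead]
      · have hgo : PySem.Chars.splitOn.go ['\n'] (f+1) (c :: rest) cur acc
            = PySem.Chars.splitOn.go ['\n'] f rest (c :: cur) acc := by
          simp [PySem.Chars.splitOn.go, List.isPrefixOf, Ne.symm hc]
        rw [hgo, ih rest (c :: cur) acc (by simp at h ⊢; omega)]
        simp only [pvSplitNL, if_neg hc]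
        cases hS : pvSplitNL rest with
        | nil => exact absurd hS (pvSplitNL_ne_nil rest)
        | cons g gs => simp [pvConsHead]

theorem pvSplitOn_eq (cs : List Char) : PySem.Chars.splitOn cs ['\n'] = pvSplitNL cs := by
  unfold PySem.Chars.splitOn
  rw [pvGo_split (cs.length + 1) cs [] [] (by omega)]
  cases hS : pvSplitNL cs with
  | nil => exact absurd hS (pvSplitNL_ne_nil cs)
  | cons g gs => simp [pvConsHead]

def pvJoinNL : List (List Char) → List Char
  | [] => []
  | [g] => g
  | g :: g' :: gs => g ++ '\n' :: pvJoinNL (g' :: gs)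

theorem pvJoinNL_cons_cons (c : Char) (g : List Char) (gs : List (List Char)) :
    pvJoinNL ((c :: g) :: gs) = c :: pvJoinNL (g :: gs) := by
  cases gs <;> rfl

theorem pvJoinNL_splitNL (cs : List Char) : pvJoinNL (pvSplitNL cs) = cs := by
  induction cs with
  | nil => rfl
  | cons c t ih =>
    simp only [pvSplitNL]
    by_cases hc : c = '\n'
    · subst hc; rw [if_pos rfl]
      cases hS : pvSplitNL t with
      | nil => exact absurd hS (pvSplitNL_ne_nil t)
      | cons g gs => rw [hS] at ih; show pvJoinNL ([] :: g :: gs) = '\n' :: t; simp [pvJoinNL, ih]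
    · rw [if_neg hc]
      cases hS : pvSplitNL t with
      | nil => exact absurd hS (pvSplitNL_ne_nil t)
      | cons g gs => rw [hS] at ih; rw [pvJoinNL_cons_cons, ih]

theorem pvSplitNL_no_nl (cs : List Char) : ∀ g ∈ pvSplitNL cs, '\n' ∉ g := by
  induction cs with
  | nil => intro g hg; simp [pvSplitNL] at hg; simp [hg]
  | cons c t ih =>
    intro g hg
    simp only [pvSplitNL] at hg
    by_cases hc : c = '\n'
    · rw [if_pos hc] at hg
      rcases List.mem_cons.mp hg with h | h
      · simp [h]
      · exact ih g h
    · rw [if_neg hc] at hg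
      cases hS : pvSplitNL t with
      | nil => exact absurd hS (pvSplitNL_ne_nil t)
      | cons g0 gs =>
        rw [hS] at hg
        rcases List.mem_cons.mp hg with h | h
        · subst h
          intro hmem
          rcases List.mem_cons.mp hmem with h' | h'
          · exact hc h'.symm
          · exact ih g0 (hS ▸ List.mem_cons_self) h'
        · exact ih g (hS ▸ List.mem_cons_of_mem _ h)

-- ---------- lower ----------

theorem pvLowerChar_nl (c : Char) : PySem.Chars.lowerChar c = '\n' ↔ c = '\n' := by
  unfold PySem.Chars.lowerChar
  by_cases h : PySem.Chars.isupper c = true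
  · rw [if_pos h]
    simp only [PySem.Chars.isupper, Bool.and_eq_true, decide_eq_true_eq, Char.le_def,
      UInt32.le_iff_toNat_le] at h
    obtain ⟨h1, h2⟩ := h
    have h1' : 65 ≤ c.toNat := by simpa using h1
    have h2' : c.toNat ≤ 90 := by simpa using h2
    have h3 : (Char.ofNat (c.toNat + 32)).toNat = c.toNat + 32 := by
      rw [Char.toNat_ofNat, if_pos (Or.inl (by omega))]
    have h10 : ('\n').toNat = 10 := by decide
    constructor
    · intro hEq
      have := congrArg Char.toNat hEq
      rw [h3, h10] at this
      omega
    · intro hEq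
      subst hEq
      rw [h10] at h1'
      omega
  · rw [if_neg h]

theorem pvLower_joinNL (L : List (List Char)) :
    PySem.Chars.lower (pvJoinNL L) = pvJoinNL (L.map PySem.Chars.lower) := by
  induction L with
  | nil => rfl
  | cons g gs ih =>
    cases gs with
    | nil => rfl
    | cons g' gs' =>
      show PySem.Chars.lower (g ++ '\n' :: pvJoinNL (g' :: gs')) = _
      simp only [PySem.Chars.lower, List.map_append, List.map_cons] at ih ⊢
      rw [show PySem.Chars.lowerChar '\n' = '\n' from by decide]
      rw [ih]
      rfl

theorem pvCountP_lower (l : List Char) :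
    (PySem.Chars.lower l).countP (· == '\n') = l.countP (· == '\n') := by
  unfold PySem.Chars.lower
  rw [List.countP_map]
  apply List.countP_congr
  intro c _
  simp only [Function.comp_apply]
  by_cases hc : c = '\n'
  · subst hc; rw [(pvLowerChar_nl '\n').mpr rfl]
  · have hne : PySem.Chars.lowerChar c ≠ '\n' := fun h => hc ((pvLowerChar_nl c).mp h)
    simp [hc, hne]

-- ---------- count ----------

theorem pvCount_go (fuel : Nat) : ∀ (l : List Char) (acc : Nat),
    l.length ≤ fuel →
    PySem.Chars.count.go ['\n'] fuel l acc = acc + l.countP (· == '\n') := by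
  induction fuel with
  | zero => intro l acc h
            have : l = [] := by cases l <;> simp_all
            subst this; simp [PySem.Chars.count.go]
  | succ f ih =>
    intro l acc h
    cases l with
    | nil => simp [PySem.Chars.count.go]
    | cons c t =>
      by_cases hc : c = '\n'
      · subst hc
        have hgo : PySem.Chars.count.go ['\n'] (f+1) ('\n' :: t) acc
            = PySem.Chars.count.go ['\n'] f t (acc + 1) := by
          simp [PySem.Chars.count.go, List.isPrefixOf]
        rw [hgo, ih t (acc+1) (by simp at h; omega)]
        simp
        omega
      · have hgo : PySem.Chars.count.go ['\n'] (f+1) (c :: t) acc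
            = PySem.Chars.count.go ['\n'] f t acc := by
          simp [PySem.Chars.count.go, List.isPrefixOf, Ne.symm hc]
        rw [hgo, ih t acc (by simp at h; omega)]
        simp [hc]

theorem pvCount_nl (l : List Char) : PySem.Chars.count l ['\n'] = l.countP (· == '\n') := by
  unfold PySem.Chars.count
  rw [if_neg (by simp), pvCount_go l.length l 0 le_rfl]
  omega

-- ---------- keywords and occurrences ----------

def pvKwsL : List (List Char) :=
  ["specification".toList, "format".toList, "structure".toList, "message".toList]

def pvP (g : List Char) : Bool := pvKwsL.any (fun k => PySem.Chars.isIn k g)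

theorem pvKws_facts : ∀ k ∈ pvKwsL, k ≠ [] ∧ '\n' ∉ k := by decide

theorem pvKw_eq (s : String) : pvKw s = pvP (PySem.Chars.lower s.toList) := by
  simp [pvKw, pvP, pvKwsL, PySem.Str.isIn_eq, PySem.Str.toList_lower]

-- an occurrence in l ++ '\n' :: t lies inside l or inside t (keywords contain no newline)
theorem pvOcc_split (k l t : List Char) (p : Nat) (hk : k ≠ []) (hnl : '\n' ∉ k)
    (h : k <+: (l ++ '\n' :: t).drop p) :
    (p + k.length ≤ l.length ∧ k <+: l.drop p) ∨
    (l.length + 1 ≤ p ∧ k <+: t.drop (p - (l.length + 1))) := by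
  by_cases hp : p ≤ l.length
  · rw [List.drop_append_of_le_length hp] at h
    by_cases hfit : p + k.length ≤ l.length
    · left
      refine ⟨hfit, ?_⟩
      have hlen : k.length ≤ (l.drop p).length := by simp; omega
      rw [List.prefix_iff_eq_take] at h ⊢
      rwa [List.take_append_of_le_length hlen] at h
    · exfalso
      apply hnl
      have hklen : 0 < k.length := List.length_pos_iff.mpr hk
      have hi : l.length - p < k.length := by omega
      have hg := h.getElem (i := l.length - p) hi
      have hr : (l.drop p ++ '\n' :: t)[l.length - p]'(by simp) = '\n' := by
        rw [List.getElem_append_right (by simp)]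
        simp
      exact (hg.trans hr) ▸ List.getElem_mem hi
  · right
    have hp' : l.length + 1 ≤ p := by omega
    refine ⟨hp', ?_⟩
    have hd : (l ++ '\n' :: t).drop p = t.drop (p - (l.length + 1)) := by
      rw [List.drop_append, List.drop_eq_nil_iff.mpr (by omega)]
      simp only [List.nil_append]
      rw [show p - l.length = (p - (l.length + 1)) + 1 by omega, List.drop_succ_cons]
    rwa [hd] at h

theorem pvOcc_embed_head (k g sfx : List Char) (q : Nat) (hq : q ≤ g.length)
    (h : k <+: g.drop q) : k <+: (g ++ sfx).drop q := by
  rw [List.drop_append_of_le_length hq]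
  exact h.trans (List.prefix_append _ _)

theorem pvOcc_embed_tail (k g t : List Char) (q : Nat) (h : k <+: t.drop q) :
    k <+: (g ++ '\n' :: t).drop (g.length + 1 + q) := by
  have hd : (g ++ '\n' :: t).drop (g.length + 1 + q) = t.drop q := by
    rw [List.drop_append, List.drop_eq_nil_iff.mpr (by omega)]
    simp only [List.nil_append]
    rw [show g.length + 1 + q - g.length = q + 1 by omega, List.drop_succ_cons]
  rwa [hd]

theorem pvOcc_lt_len (k g : List Char) (q : Nat) (hk : k ≠ []) (h : k <+: g.drop q) :
    q < g.length := by
  by_contra hq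
  rw [List.drop_eq_nil_iff.mpr (by omega)] at h
  exact hk (List.prefix_nil.mp h)

theorem pvIsIn_occ (k g : List Char) (hk : k ≠ []) (h : PySem.Chars.isIn k g = true) :
    ∃ q, q < g.length ∧ k <+: g.drop q := by
  obtain ⟨q, hq⟩ := (PySem.Chars.exists_prefix_drop_iff_isIn k g).mpr h
  exact ⟨q, pvOcc_lt_len k g q hk hq, hq⟩

theorem pvOcc_embed (k : List Char) (L : List (List Char)) (g : List Char) (q : Nat)
    (hg : g ∈ L) (hq : q ≤ g.length) (h : k <+: g.drop q) :
    ∃ p, k <+: (pvJoinNL L).drop p := by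
  induction L with
  | nil => cases hg
  | cons g0 L ih =>
    rcases List.mem_cons.mp hg with h0 | h0
    · subst h0
      cases L with
      | nil => exact ⟨q, h⟩
      | cons g1 L' =>
        refine ⟨q, ?_⟩
        show k <+: (g ++ '\n' :: pvJoinNL (g1 :: L')).drop q
        exact pvOcc_embed_head k g _ q hq h
    · cases L with
      | nil => cases h0
      | cons g1 L' =>
        obtain ⟨p, hp⟩ := ih h0
        refine ⟨g0.length + 1 + p, ?_⟩
        show k <+: (g0 ++ '\n' :: pvJoinNL (g1 :: L')).drop (g0.length + 1 + p)
        exact pvOcc_embed_tail k g0 _ p hp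

-- MAIN: the first line matching a keyword is the line containing the earliest keyword occurrence,
-- whose index equals the number of '\n' before that occurrence.
theorem pvMain : ∀ (L : List (List Char)), (∀ g ∈ L, '\n' ∉ g) →
    ∀ (p : Nat) (k : List Char), k ∈ pvKwsL →
    k <+: (pvJoinNL L).drop p →
    (∀ k' ∈ pvKwsL, ∀ q < p, ¬ k' <+: (pvJoinNL L).drop q) →
    L.findIdx? pvP = some (((pvJoinNL L).take p).countP (· == '\n')) := by
  intro L
  induction L with
  | nil =>
    intro _ p k hkm hocc _
    exfalso
    have hk : k ≠ [] := (pvKws_facts k hkm).1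
    simp [pvJoinNL] at hocc
    exact hk hocc
  | cons g L ih =>
    intro hnl p k hkm hocc hmin
    have hk := (pvKws_facts k hkm).1
    have hknl := (pvKws_facts k hkm).2
    have hgnl : '\n' ∉ g := hnl g List.mem_cons_self
    cases L with
    | nil =>
      have hPg : pvP g = true :=
        List.any_eq_true.mpr ⟨k, hkm, (PySem.Chars.exists_prefix_drop_iff_isIn k g).mp ⟨p, hocc⟩⟩
      rw [List.findIdx?_cons, if_pos hPg]
      have hcnt : ((pvJoinNL [g]).take p).countP (· == '\n') = 0 := by
        apply List.countP_eq_zero.mpr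
        intro a ha hb
        have ha' : a ∈ g := List.mem_of_mem_take (by simpa [pvJoinNL] using ha)
        exact hgnl ((beq_iff_eq.mp hb) ▸ ha')
      rw [hcnt]
    | cons g1 L' =>
      have hshape : pvJoinNL (g :: g1 :: L') = g ++ '\n' :: pvJoinNL (g1 :: L') := rfl
      rw [hshape] at hocc
      rcases pvOcc_split k g (pvJoinNL (g1 :: L')) p hk hknl hocc with ⟨hfit, hpre⟩ | ⟨hge, hpre⟩
      · have hPg : pvP g = true :=
          List.any_eq_true.mpr ⟨k, hkm, (PySem.Chars.exists_prefix_drop_iff_isIn k g).mp ⟨p, hpre⟩⟩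
        rw [List.findIdx?_cons, if_pos hPg]
        have hple : p ≤ g.length := by omega
        have hcnt : ((pvJoinNL (g :: g1 :: L')).take p).countP (· == '\n') = 0 := by
          rw [hshape, List.take_append_of_le_length hple]
          apply List.countP_eq_zero.mpr
          intro a ha hb
          exact hgnl ((beq_iff_eq.mp hb) ▸ List.mem_of_mem_take ha)
        rw [hcnt]
      · have hPgF : pvP g = false := by
          rw [Bool.eq_false_iff]
          intro hPg
          obtain ⟨k', hk'm, hk'in⟩ := List.any_eq_true.mp hPg
          obtain ⟨q, hqlt, hq⟩ := pvIsIn_occ k' g (pvKws_facts k' hk'm).1 hk'in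
          exact hmin k' hk'm q (by omega)
            (hshape ▸ pvOcc_embed_head k' g _ q (by omega) hq)
        rw [List.findIdx?_cons, if_neg (by simp [hPgF])]
        have hmin' : ∀ k' ∈ pvKwsL, ∀ q < p - (g.length + 1),
            ¬ k' <+: (pvJoinNL (g1 :: L')).drop q := by
          intro k' hk'm q hq hcon
          exact hmin k' hk'm (g.length + 1 + q) (by omega)
            (hshape ▸ pvOcc_embed_tail k' g _ q hcon)
        have hIH := ih (fun g' hg' => hnl g' (List.mem_cons_of_mem _ hg'))
          (p - (g.length + 1)) k hkm hpre hmin'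
        rw [hIH]
        simp only [Option.map_some]
        congr 1
        have htake : (g ++ '\n' :: pvJoinNL (g1 :: L')).take p
            = g ++ '\n' :: (pvJoinNL (g1 :: L')).take (p - (g.length + 1)) := by
          rw [List.take_append, List.take_of_length_le (by omega)]
          congr 1
          rw [show p - g.length = (p - (g.length + 1)) + 1 by omega, List.take_succ_cons]
        rw [hshape, htake, List.countP_append, List.countP_cons]
        have hg0 : g.countP (· == '\n') = 0 :=
          List.countP_eq_zero.mpr (fun a ha hb => hgnl ((beq_iff_eq.mp hb) ▸ ha))
        simp [hg0]

-- ===== VERDICT (by name: the statement is the Claim_ definition above) =====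
theorem extract_protocol_spec_py_spec : Claim_equal_extract_protocol_spec_py := by
  intro text _
  unfold Spec_extract_protocol_spec_py
  simp only [extract_protocol_spec_py, extract_protocol_spec_py_alt]
  have hsep : ("\n" : String).toList = ['\n'] := by decide
  -- the split of text, as pvSplitNL on the character list
  have hmapEq := PySem.Str.split?_map text "\n"
  rw [hsep] at hmapEq
  rw [show PySem.Chars.split? text.toList ['\n'] = some (pvSplitNL text.toList) by
    simp [PySem.Chars.split?, pvSplitOn_eq]] at hmapEq
  obtain ⟨lines, hlines, hlmap⟩ : ∃ ls, PySem.Str.split? text "\n" = some ls ∧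
      ls.map String.toList = pvSplitNL text.toList := by
    cases h : PySem.Str.split? text "\n" with
    | none => rw [h] at hmapEq; simp at hmapEq
    | some ls => rw [h] at hmapEq; simp at hmapEq; exact ⟨ls, rfl, hmapEq⟩
  rw [hlines]
  simp only [Option.getD_some]
  -- the lowered text as the join of the lowered lines
  have hlow : (PySem.Str.lower text).toList = PySem.Chars.lower text.toList :=
    PySem.Str.toList_lower text
  have hJ : pvJoinNL ((pvSplitNL text.toList).map PySem.Chars.lower)
      = PySem.Chars.lower text.toList := by
    conv_rhs => rw [← pvJoinNL_splitNL text.toList]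
    exact (pvLower_joinNL _).symm
  -- the hit list, expressed over pvKwsL
  have hhits : (["specification", "format", "structure", "message"].map
        (fun k => PySem.Str.find (PySem.Str.lower text) k))
      = pvKwsL.map (fun k => PySem.Chars.find (PySem.Chars.lower text.toList) k) := by
    simp [pvKwsL, PySem.Str.find_eq, hlow]
  rw [hhits]
  -- A's loop characterisation
  rw [pvLoopA_false]
  -- A's first-match index, moved to the lowered char lines
  have hIdx : lines.findIdx? pvKw
      = ((pvSplitNL text.toList).map PySem.Chars.lower).findIdx? pvP := by
    rw [show pvKw = (fun s => pvP (PySem.Chars.lower s.toList)) from funext pvKw_eq]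
    rw [show (fun s => pvP (PySem.Chars.lower s.toList))
        = ((fun g => pvP (PySem.Chars.lower g)) ∘ String.toList) from rfl]
    rw [← List.findIdx?_map, hlmap, List.findIdx?_map]
    rfl
  cases hmin? : PySem.List.min? ((pvKwsL.map
      (fun k => PySem.Chars.find (PySem.Chars.lower text.toList) k)).filter
      (fun p => decide (0 ≤ p))) (fun p => p) with
  | none =>
    -- no keyword occurs anywhere in the lowered text
    have hempty := (PySem.List.min?_eq_none_iff _ _).mp hmin?
    have hnone : ∀ k ∈ pvKwsL, PySem.Chars.find (PySem.Chars.lower text.toList) k = -1 := by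
      intro k hk
      have hmemf : PySem.Chars.find (PySem.Chars.lower text.toList) k
          ∈ pvKwsL.map (fun k => PySem.Chars.find (PySem.Chars.lower text.toList) k) :=
        List.mem_map_of_mem hk
      have hne := List.filter_eq_nil_iff.mp hempty _ hmemf
      have hge := PySem.Chars.neg_one_le_find (PySem.Chars.lower text.toList) k
      simp at hne
      omega
    have hnoIdx : lines.findIdx? pvKw = none := by
      rw [hIdx]
      apply List.findIdx?_eq_none_iff.mpr
      intro g hg
      rw [Bool.eq_false_iff]
      intro hPg
      obtain ⟨k, hkm, hkin⟩ := List.any_eq_true.mp hPg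
      obtain ⟨q, hqlt, hq⟩ := pvIsIn_occ k g (pvKws_facts k hkm).1 hkin
      obtain ⟨p, hp⟩ := pvOcc_embed k _ g q hg (by omega) hq
      rw [hJ] at hp
      have : PySem.Chars.find (PySem.Chars.lower text.toList) k = -1 := hnone k hkm
      have hinfix : k <:+: PySem.Chars.lower text.toList :=
        (PySem.Chars.isIn_iff_infix _ _).mp
          ((PySem.Chars.exists_prefix_drop_iff_isIn _ _).mp ⟨p, hp⟩)
      have := (PySem.Chars.find_nonneg_iff (PySem.Chars.lower text.toList) k).mpr hinfix
      omega
    rw [hnoIdx]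
    rfl
  | some m =>
    -- the earliest keyword occurrence
    have hmem := PySem.List.min?_mem hmin?
    have hm0 : (0 : Int) ≤ m := by
      have := (List.mem_filter.mp hmem).2
      simpa using this
    obtain ⟨k₀, hk₀m, hk₀eq⟩ := List.mem_map.mp (List.mem_filter.mp hmem).1
    have hfind0 : 0 ≤ PySem.Chars.find (PySem.Chars.lower text.toList) k₀ := by
      rw [hk₀eq]; exact hm0
    have hocc : k₀ <+: (PySem.Chars.lower text.toList).drop m.toNat := by
      have := (PySem.Chars.find_spec hfind0).1
      rwa [hk₀eq] at this
    have hminimal : ∀ k' ∈ pvKwsL, ∀ q < m.toNat,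
        ¬ k' <+: (PySem.Chars.lower text.toList).drop q := by
      intro k' hk' q hq hcon
      have hinfix : k' <:+: PySem.Chars.lower text.toList :=
        (PySem.Chars.isIn_iff_infix _ _).mp
          ((PySem.Chars.exists_prefix_drop_iff_isIn _ _).mp ⟨q, hcon⟩)
      have hge : 0 ≤ PySem.Chars.find (PySem.Chars.lower text.toList) k' :=
        (PySem.Chars.find_nonneg_iff _ _).mpr hinfix
      have hmemf : PySem.Chars.find (PySem.Chars.lower text.toList) k'
          ∈ (pvKwsL.map (fun k => PySem.Chars.find (PySem.Chars.lower text.toList) k)).filter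
            (fun p => decide (0 ≤ p)) :=
        List.mem_filter.mpr ⟨List.mem_map_of_mem hk', by simpa using hge⟩
      have hle := PySem.List.min?_isMin hmin? _ hmemf
      have hlt : q < (PySem.Chars.find (PySem.Chars.lower text.toList) k').toNat := by omega
      exact (PySem.Chars.find_spec hge).2 q hlt hcon
    have hnlL : ∀ g ∈ (pvSplitNL text.toList).map PySem.Chars.lower, '\n' ∉ g := by
      intro g hg hmemnl
      obtain ⟨g₀, hg₀, rfl⟩ := List.mem_map.mp hg
      obtain ⟨c, hc, hceq⟩ := List.mem_map.mp hmemnl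
      exact pvSplitNL_no_nl text.toList g₀ hg₀ ((pvLowerChar_nl c).mp hceq ▸ hc)
    have hMain := pvMain ((pvSplitNL text.toList).map PySem.Chars.lower) hnlL m.toNat k₀ hk₀m
      (by rw [hJ]; exact hocc) (by rw [hJ]; exact hminimal)
    rw [hJ] at hMain
    rw [hIdx, hMain]
    dsimp only
    -- B's line index equals A's first-match index
    have hiB : PySem.Str.count (PySem.Str.slice text none (some m)) "\n"
        = ((PySem.Chars.lower text.toList).take m.toNat).countP (· == '\n') := by
      rw [PySem.Str.count_eq, hsep, PySem.Str.toList_slice, PySem.Chars.slice_eq_listSlice,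
        PySem.List.slice_to text.toList hm0, pvCount_nl]
      have : (PySem.Chars.lower text.toList).take m.toNat
          = PySem.Chars.lower (text.toList.take m.toNat) := by
        simp [PySem.Chars.lower, List.map_take]
      rw [this, pvCountP_lower]
    rw [hiB]
    -- both sides now drop the same number of lines, filter, take 31 and join
    rw [PySem.List.slice_from lines (by positivity), PySem.List.slice_to _ (by norm_num)]
    simp
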